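-- pv_equiv track=rewrite | github.com/ahalya45/IN1000 | exam24.py | flertall
-- ===== SOURCE A (Python) =====
-- def flertall(dyreliste:list):
--     max = 0
--     animal = "uavgjort"
--     for dyr in set(dyreliste):      #
--         teller = dyreliste.count(dyr)
--         if teller > max:
--             max = teller
--             animal = dyr
--         elif teller == max:
--             animal = "uavgjort"
--     return animal
-- ===== SOURCE B (Python) =====
-- def flertall(dyreliste: list):
--     counts = {}
--     for dyr in dyreliste:
--         counts[dyr] = counts.get(dyr, 0) + 1
--     if not counts:
--         return "uavgjort"
--     beste = max(counts.values())
--     kandidater = [dyr for dyr, c in counts.items() if c == beste]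
--     return kandidater[0] if len(kandidater) == 1 else "uavgjort"
-- ===== Notes on version B (the rewrite author's own statement) =====
-- stated objective: faster
-- what changed: A scans the whole list with count() once per distinct element inside a running-max loop over set(dyreliste); B builds a frequency dict in one pass, takes the max of its values and returns the unique element attaining it (else 'uavgjort').
import Mathlib
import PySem

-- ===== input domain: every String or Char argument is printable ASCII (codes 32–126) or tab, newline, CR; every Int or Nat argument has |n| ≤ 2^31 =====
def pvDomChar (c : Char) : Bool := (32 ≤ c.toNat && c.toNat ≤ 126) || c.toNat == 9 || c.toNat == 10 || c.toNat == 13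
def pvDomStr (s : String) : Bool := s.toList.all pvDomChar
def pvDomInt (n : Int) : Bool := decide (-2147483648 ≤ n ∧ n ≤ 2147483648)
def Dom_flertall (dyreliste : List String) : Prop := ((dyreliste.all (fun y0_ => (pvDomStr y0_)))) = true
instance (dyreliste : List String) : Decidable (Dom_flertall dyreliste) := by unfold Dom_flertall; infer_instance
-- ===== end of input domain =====

-- B replaces A's per-distinct-element count() rescans with a single-pass frequency dict,
-- then compares the max of the counts against the (unique or not) element attaining it.
-- A's iteration over Python's set(dyreliste) is in hash order; the loop's final result is
-- order-independent, and the port iterates in first-occurrence order.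

-- ===== PORT A =====
def flertall (dyreliste : List String) : String :=
  ((PySem.Set.ofList dyreliste).foldl
    (fun (st : Int × String) dyr =>
      let teller : Int := (PySem.List.count dyreliste dyr : Int)
      if teller > st.1 then (teller, dyr)
      else if teller = st.1 then (st.1, "uavgjort")
      else st)
    (0, "uavgjort")).2

-- ===== PORT B =====
def flertall_alt (dyreliste : List String) : String :=
  let counts : PySem.Dict String Int :=
    dyreliste.foldl (fun d dyr => d.insert dyr (d.getD dyr 0 + 1)) PySem.Dict.empty
  if counts.items.isEmpty then "uavgjort"
  else
    match PySem.List.max? counts.values (fun v => v) with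
    | none => "uavgjort"   -- unreachable: guarded by the isEmpty check (Python's max would raise)
    | some beste =>
      let kandidater := (counts.items.filter (fun p => p.2 == beste)).map (fun p => p.1)
      if kandidater.length == 1 then PySem.List.pyGetD kandidater 0 "uavgjort" else "uavgjort"

-- ===== PRECONDITION & SPEC =====
def Spec_flertall (dyreliste : List String) (out : String) : Prop := out = flertall_alt dyreliste
instance (dyreliste : List String) (out : String) : Decidable (Spec_flertall dyreliste out) := by unfold Spec_flertall; infer_instance

-- ===== CLAIM (what is proved, stated in full; the proofs are below) =====
def Claim_equal_flertall : Prop := ∀ (dyreliste : List String), Dom_flertall dyreliste → Spec_flertall dyreliste (flertall dyreliste)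

-- ===== LEMMAS AND PROOFS =====

-- the "unique winner or tie" selector both programs reduce to
def pick1 : List String → String
  | [w] => w
  | _ => "uavgjort"

-- B's tail expression is pick1
lemma pick1_of_if (l : List String) :
    (if l.length == 1 then PySem.List.pyGetD l 0 "uavgjort" else "uavgjort") = pick1 l := by
  match l with
  | [] => rfl
  | [w] => simp [pick1, PySem.List.pyGetD_zero_cons]
  | a :: b :: t => simp [pick1, List.length]

-- running max over a projection, as used below
def runMax (c : String → Int) (l : List String) (mx : Int) : Int :=
  l.foldl (fun m d => max m (c d)) mx

-- characterization of A's loop, for an arbitrary count function and start state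
lemma foldA_spec (c : String → Int) (l : List String) (mx : Int) (an : String) :
    l.foldl
      (fun (st : Int × String) dyr =>
        if c dyr > st.1 then (c dyr, dyr)
        else if c dyr = st.1 then (st.1, "uavgjort")
        else st)
      (mx, an)
    = (runMax c l mx,
       if mx < runMax c l mx then pick1 (l.filter (fun d => c d == runMax c l mx))
       else if l.filter (fun d => c d == mx) = [] then an else "uavgjort") := by
  induction l generalizing mx an with
  | nil => simp [runMax]
  | cons d t ih =>
    by_cases h1 : c d > mx
    · -- teller > max: state becomes (c d, d)
      have hmax : max mx (c d) = c d := by omega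
      simp only [List.foldl_cons, if_pos h1, runMax, hmax]
      rw [ih (c d) d]
      have hcd : c d ≤ runMax c t (c d) := (PySem.List.le_foldl_max_int t c (c d)).1
      by_cases h2 : c d < runMax c t (c d)
      · have hmx : mx < runMax c t (c d) := by omega
        have hne : ¬ (c d == runMax c t (c d)) = true := by simp; omega
        simp only [runMax] at *
        rw [if_pos h2, if_pos hmx, List.filter_cons, if_neg hne]
      · have heq : runMax c t (c d) = c d := by omega
        have hmx : mx < runMax c t (c d) := by omega
        simp only [runMax] at *
        rw [if_neg h2, if_pos hmx, heq, List.filter_cons]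
        simp only [beq_self_eq_true, if_pos]
        cases hf : t.filter (fun x => c x == c d) with
        | nil => simp [pick1]
        | cons a u => simp [pick1]
    · by_cases h2 : c d = mx
      · -- teller == max: animal becomes "uavgjort"
        have hmax : max mx (c d) = mx := by omega
        simp only [List.foldl_cons, if_neg h1, if_pos h2, runMax, hmax]
        rw [ih mx "uavgjort"]
        simp only [runMax] at *
        by_cases h3 : mx < t.foldl (fun m d => max m (c d)) mx
        · have hne : ¬ (c d == t.foldl (fun m d => max m (c d)) mx) = true := by simp; omega
          rw [if_pos h3, if_pos h3, List.filter_cons, if_neg hne]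
        · rw [if_neg h3, if_neg h3, List.filter_cons]
          have : (c d == mx) = true := by simp; omega
          simp [this]
      · -- teller < max: state unchanged
        have h1' : c d < mx := by omega
        have hmax : max mx (c d) = mx := by omega
        simp only [List.foldl_cons, if_neg h1, if_neg h2, runMax, hmax]
        rw [ih mx an]
        simp only [runMax] at *
        have hle := (PySem.List.le_foldl_max_int t c mx).1
        have hne : ¬ (c d == t.foldl (fun m d => max m (c d)) mx) = true := by simp; omega
        have hne' : ¬ (c d == mx) = true := by simp; omega
        rw [List.filter_cons, if_neg hne, List.filter_cons, if_neg hne']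

-- B's dict loop IS Counter(dyreliste)
lemma counts_eq_counter (xs : List String) :
    xs.foldl (fun d dyr => d.insert dyr (d.getD dyr 0 + 1)) PySem.Dict.empty
      = PySem.Dict.counter xs := rfl

lemma count_pos_of_mem {xs : List String} {d : String} (h : d ∈ PySem.Set.ofList xs) :
    1 ≤ (PySem.List.count xs d : Int) := by
  have hx : d ∈ xs := (PySem.Set.mem_ofList xs d).mp h
  have := List.count_pos_iff.mpr hx
  simp only [PySem.List.count]
  omega

lemma flertall_eq_pick1 (xs : List String) :
    flertall xs
      = pick1 ((PySem.Set.ofList xs).filter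
          (fun d => (PySem.List.count xs d : Int)
            == runMax (fun d => (PySem.List.count xs d : Int)) (PySem.Set.ofList xs) 0)) := by
  set c : String → Int := fun d => (PySem.List.count xs d : Int) with hc
  unfold flertall
  rw [foldA_spec c (PySem.Set.ofList xs) 0 "uavgjort"]
  cases hS : PySem.Set.ofList xs with
  | nil => simp [runMax, pick1]
  | cons h t =>
    have hmem : h ∈ PySem.Set.ofList xs := by rw [hS]; exact List.mem_cons_self
    have h1 : 1 ≤ c h := count_pos_of_mem hmem
    have hch : c h ≤ runMax c (h :: t) 0 := by
      have := (PySem.List.le_foldl_max_int (h :: t) c 0).2 h List.mem_cons_self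
      simpa [runMax] using this
    have hpos : 0 < runMax c (h :: t) 0 := by omega
    rw [hc] at hpos
    simp only [hc]
    rw [if_pos hpos]

lemma flertall_alt_eq_pick1 (xs : List String) :
    flertall_alt xs
      = pick1 ((PySem.Set.ofList xs).filter
          (fun d => (PySem.List.count xs d : Int)
            == runMax (fun d => (PySem.List.count xs d : Int)) (PySem.Set.ofList xs) 0)) := by
  set c : String → Int := fun d => (PySem.List.count xs d : Int) with hc
  unfold flertall_alt
  rw [counts_eq_counter]
  cases hS : PySem.Set.ofList xs with
  | nil =>
    have : (PySem.Dict.counter xs).items = [] := by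
      rw [PySem.Dict.items_counter, hS]; rfl
    simp [this, pick1]
  | cons h t =>
    have hitems : (PySem.Dict.counter xs).items = (h :: t).map (fun k => (k, c k)) := by
      rw [PySem.Dict.items_counter, hS]
      simp [hc, PySem.List.count]
    have hne : ¬ (PySem.Dict.counter xs).items.isEmpty := by simp [hitems]
    simp only [hne, Bool.false_eq_true, if_false]
    have hvals : (PySem.Dict.counter xs).values = (h :: t).map c := by
      simp only [PySem.Dict.values, hitems, List.map_map]
      rfl
    have hmax : PySem.List.max? (PySem.Dict.counter xs).values (fun v => v)
        = some (runMax c (h :: t) 0) := by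
      rw [hvals, List.map_cons, PySem.List.max?_id_cons]
      congr 1
      have hmem : h ∈ PySem.Set.ofList xs := by rw [hS]; exact List.mem_cons_self
      have h1 : 1 ≤ c h := count_pos_of_mem hmem
      have h0 : max 0 (c h) = c h := by omega
      simp [runMax, List.foldl_map, h0]
    rw [hmax]
    simp only [hitems]
    rw [List.filter_map, List.map_map]
    have hfm : ((fun p : String × Int => p.1) ∘ fun k => (k, c k)) = id := rfl
    rw [hfm, List.map_id]
    rw [pick1_of_if]
    rfl

-- ===== VERDICT (by name: the statement is the Claim_ definition above) =====
theorem flertall_spec : Claim_equal_flertall := by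
  intro xs _
  unfold Spec_flertall
  rw [flertall_eq_pick1, flertall_alt_eq_pick1]
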